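-- pv_equiv track=rewrite | github.com/DASchechtman/000-Screeps-Code | flatten.py | EditText
-- ===== SOURCE A (Python) =====
-- def RestructReqPath(line):
--     found_slash = False
--     start = line.index("(")
--     tmp_line = ""
--
--     for c in range(len(line)-1, -1, -1):
--         ch = line[c]
--
--         if ch == "/":
--             found_slash = True
--
--         if not found_slash:
--             tmp_line = f"{ch}{tmp_line}"
--         elif c <= start:
--             if c == start:
--                 tmp_line = f"\"./{tmp_line}"
--             tmp_line = f"{ch}{tmp_line}"
--
--     return tmp_line
--
-- def EditText(text_file):
--     edit_output = []
--
--     for i in range(len(text_file)):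
--         line = text_file[i]
--         if "= require(" in line:
--             line = RestructReqPath(line)
--         edit_output.append(line)
--
--     return edit_output
-- ===== SOURCE B (Python) =====
-- def EditText(text_file):
--     def fix(line):
--         head, sep, tail = line.rpartition("/")
--         if sep and "(" in head:
--             return head[:head.index("(") + 1] + '"./' + tail
--         return line
--     return [fix(line) if "= require(" in line else line for line in text_file]
-- ===== Notes on version B (the rewrite author's own statement) =====
-- stated objective: simpler
-- what changed: RestructReqPath's backward character-by-character loop with found_slash/tmp_line state is replaced by a direct formula: rpartition on the last '/' and, when the head still contains '(', one slice head[:index('(')+1] + '"./' + tail; the wrapper becomes a list comprehension.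
import Mathlib
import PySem

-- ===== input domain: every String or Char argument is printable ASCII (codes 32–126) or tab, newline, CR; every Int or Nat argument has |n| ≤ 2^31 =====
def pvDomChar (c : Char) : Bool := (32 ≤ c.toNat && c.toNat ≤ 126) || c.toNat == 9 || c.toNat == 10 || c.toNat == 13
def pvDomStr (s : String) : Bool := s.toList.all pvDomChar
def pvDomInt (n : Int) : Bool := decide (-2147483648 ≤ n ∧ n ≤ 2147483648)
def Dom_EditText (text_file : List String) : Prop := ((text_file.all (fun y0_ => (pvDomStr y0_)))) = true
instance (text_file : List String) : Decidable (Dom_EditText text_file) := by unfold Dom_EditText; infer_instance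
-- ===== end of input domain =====

-- B replaces A's backward character-accumulating loop by a direct rpartition/slice formula (objective: simpler).


-- ===== PORT A =====
-- the backward loop 'for c in range(len(line)-1, -1, -1)' as structural recursion:
-- pvRestructLoop start k l computes the (found_slash, tmp_line) state after processing
-- indices k .. k+|l|-1 in DESCENDING order (the recursive call handles the higher indices first,
-- exactly as Python's countdown loop does, with the same state and the same branch order).
def pvRestructLoop (start : Int) (k : Int) : List Char → Bool × List Char
  | [] => (false, [])
  | ch :: rest =>
    let r := pvRestructLoop start (k + 1) rest
    let found := r.1 || (ch == '/')
    if !found then (found, ch :: r.2)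
    else if k ≤ start then
      (found, ch :: (if k == start then '"' :: '.' :: '/' :: r.2 else r.2))
    else (found, r.2)

-- line.index("(") : every call site guarantees '(' ∈ line (the "= require(" guard), where index = find
def RestructReqPath (line : String) : String :=
  String.ofList (pvRestructLoop (PySem.Str.find line "(") 0 line.toList).2

def EditText (text_file : List String) : List String :=
  (PySem.List.pyRange 0 (PySem.List.len text_file) 1).foldl
    (fun edit_output i =>
      let line := PySem.List.pyGetD text_file i ""
      let line := if PySem.Str.isIn "= require(" line then RestructReqPath line else line
      edit_output ++ [line]) []

-- ===== PORT B =====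
-- str.rpartition("/") hand-ported for this single-character separator (PySem has no rpartition);
-- exact CPython semantics: split at the LAST '/', or ("", "", s) if there is none.
def pvRPartition (cs : List Char) : List Char × List Char × List Char :=
  let tl := (cs.reverse.takeWhile (fun c => c != '/')).reverse
  if tl.length = cs.length then ([], [], cs)
  else (cs.take (cs.length - tl.length - 1), ['/'], tl)

-- head[:head.index("(") + 1] + '"./' + tail  (the slice bound is ≥ 0, so it is a take)
def pvFix (line : String) : String :=
  let p := pvRPartition line.toList
  if p.2.1 ≠ [] ∧ PySem.Chars.isIn ['('] p.1 then
    String.ofList (p.1.take ((PySem.Chars.find p.1 ['(']).toNat + 1) ++ ('"' :: '.' :: '/' :: p.2.2))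
  else line

def EditText_alt (text_file : List String) : List String :=
  text_file.map (fun line => if PySem.Str.isIn "= require(" line then pvFix line else line)

-- ===== PRECONDITION & SPEC =====
def Spec_EditText (text_file : List String) (out : List String) : Prop := out = EditText_alt text_file
instance (text_file : List String) (out : List String) : Decidable (Spec_EditText text_file out) := by unfold Spec_EditText; infer_instance

-- ===== CLAIM (what is proved, stated in full; the proofs are below) =====
def Claim_equal_EditText : Prop := ∀ (text_file : List String), Dom_EditText text_file → Spec_EditText text_file (EditText text_file)

-- ===== LEMMAS AND PROOFS =====

-- the suffix of cs after its last '/', as rpartition computes it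
def pvAfterLast (cs : List Char) : List Char := (cs.reverse.takeWhile (fun c => c != '/')).reverse

theorem pvAfterLast_no_slash {q : List Char} (h : '/' ∉ q) : pvAfterLast q = q := by
  unfold pvAfterLast
  rw [List.takeWhile_eq_self_iff.2, List.reverse_reverse]
  intro x hx
  simp only [List.mem_reverse] at hx
  simp [ne_eq]
  rintro rfl; exact h hx

theorem pvAfterLast_last {w tl : List Char} (h : '/' ∉ tl) : pvAfterLast (w ++ '/' :: tl) = tl := by
  unfold pvAfterLast
  rw [List.reverse_append, List.reverse_cons]
  have h1 : tl.reverse.takeWhile (fun c => c != '/') = tl.reverse := by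
    rw [List.takeWhile_eq_self_iff]
    intro x hx
    simp only [List.mem_reverse] at hx
    simp [ne_eq]
    rintro rfl; exact h hx
  rw [show tl.reverse ++ ['/'] ++ w.reverse = tl.reverse ++ ('/' :: w.reverse) by simp,
      List.takeWhile_append, h1]
  simp

-- first-occurrence split
theorem pvSplitFirst {c : Char} {q : List Char} (h : c ∈ q) :
    ∃ u v, q = u ++ c :: v ∧ c ∉ u := by
  induction q with
  | nil => cases h
  | cons a q ih =>
    by_cases hac : a = c
    · exact ⟨[], q, by simp [hac], by simp⟩
    · rcases List.mem_cons.mp h with h' | h'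
      · exact absurd h'.symm hac
      · obtain ⟨u, v, rfl, hu⟩ := ih h'
        exact ⟨a :: u, v, by simp, by
          simp only [List.mem_cons, not_or]
          exact ⟨fun hh => hac hh.symm, hu⟩⟩

-- last-occurrence split
theorem pvSplitLast {q : List Char} (h : '/' ∈ q) :
    ∃ u tl, q = u ++ '/' :: tl ∧ '/' ∉ tl := by
  have h' : '/' ∈ q.reverse := by simpa using h
  obtain ⟨a, b, hq, ha⟩ := pvSplitFirst h'
  refine ⟨b.reverse, a.reverse, ?_, by simpa using ha⟩
  have := congrArg List.reverse hq
  simpa using this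

theorem pvLoop_no_slash {q : List Char} (st : Int) (h : '/' ∉ q) :
    ∀ k, pvRestructLoop st k q = (false, q) := by
  induction q with
  | nil => intro k; rfl
  | cons ch q ih =>
    intro k
    have hch : (ch == '/') = false := by
      simp only [beq_eq_false_iff_ne, ne_eq]; rintro rfl; exact h (by simp)
    have hq : '/' ∉ q := fun hx => h (by simp [hx])
    simp [pvRestructLoop, ih hq (k + 1), hch]

theorem pvLoop_high {q : List Char} (st : Int) (h : '/' ∈ q) :
    ∀ k, st < k → pvRestructLoop st k q = (true, pvAfterLast q) := by
  induction q with
  | nil => cases h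
  | cons ch q ih =>
    intro k hk
    by_cases hq : '/' ∈ q
    · have hal : pvAfterLast (ch :: q) = pvAfterLast q := by
        obtain ⟨u, tl, rfl, htl⟩ := pvSplitLast hq
        rw [show ch :: (u ++ '/' :: tl) = (ch :: u) ++ '/' :: tl by simp,
            pvAfterLast_last htl, pvAfterLast_last htl]
      have hnk : ¬ k ≤ st := by omega
      simp [pvRestructLoop, ih hq (k + 1) (by omega), hnk, hal]
    · have hch : ch = '/' := by
        rcases List.mem_cons.mp h with h' | h'
        · exact h'.symm
        · exact absurd h' hq
      subst hch
      have hal : pvAfterLast ('/' :: q) = q := pvAfterLast_last (w := []) hq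
      have hnk : ¬ k ≤ st := by omega
      simp [pvRestructLoop, pvLoop_no_slash st hq (k + 1), hnk, hal]

theorem pvLoop_low (st : Int) (p : List Char) :
    ∀ (k : Int) (r : List Char), k + (p.length : Int) ≤ st →
      ∃ b, pvRestructLoop st k (p ++ r) = (b, p ++ (pvRestructLoop st (k + p.length) r).2) := by
  induction p with
  | nil => intro k r _; exact ⟨(pvRestructLoop st k r).1, by simp⟩
  | cons ch p ih =>
    intro k r hk
    simp only [List.length_cons] at hk
    push_cast at hk
    obtain ⟨b, hb⟩ := ih (k + 1) r (by omega)
    have harith : k + 1 + (p.length : Int) = k + ((p.length : Int) + 1) := by ring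
    rw [harith] at hb
    have hkne : (k == st) = false := by simp only [beq_eq_false_iff_ne]; omega
    have hkle : k ≤ st := by omega
    simp only [List.cons_append, pvRestructLoop, List.length_cons]
    push_cast
    rw [hb]
    cases hF : (b || (ch == '/')) with
    | false => exact ⟨false, by simp⟩
    | true => exact ⟨true, by simp [hkle, hkne]⟩

-- first '(' of pre ++ '(' :: mid is at index pre.length when '(' ∉ pre
theorem pvFind_decomp {pre mid : List Char} (hp : '(' ∉ pre) :
    PySem.Chars.find (pre ++ '(' :: mid) ['('] = (pre.length : Int) := by
  have hinf : ['('] <:+: pre ++ '(' :: mid := ⟨pre, mid, by simp⟩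
  have h0 : 0 ≤ PySem.Chars.find (pre ++ '(' :: mid) ['('] :=
    (PySem.Chars.find_nonneg_iff _ _).2 hinf
  obtain ⟨hpre, hmin⟩ := PySem.Chars.find_spec h0
  set f := PySem.Chars.find (pre ++ '(' :: mid) ['('] with hf
  have hle : f.toNat ≤ pre.length := by
    by_contra hgt
    push Not at hgt
    exact hmin pre.length hgt ⟨mid, by rw [List.drop_append_of_le_length (le_refl _)]; simp⟩
  have hge : pre.length ≤ f.toNat := by
    by_contra hlt
    push Not at hlt
    obtain ⟨t, ht⟩ := hpre
    rw [List.drop_append_of_le_length (le_of_lt hlt)] at ht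
    have hne : pre.drop f.toNat ≠ [] := by
      intro hnil
      have := congrArg List.length hnil
      simp at this
      omega
    obtain ⟨c, rest, hcr⟩ := List.exists_cons_of_ne_nil hne
    rw [hcr] at ht
    simp only [List.cons_append, List.cons.injEq] at ht
    apply hp
    have : c ∈ pre.drop f.toNat := by rw [hcr]; simp
    exact ht.1 ▸ List.mem_of_mem_drop this
  omega

-- the per-line fact: on a line containing "= require(", the two rewrites agree
theorem pvFix_eq (line : String) (h : PySem.Str.isIn "= require(" line = true) :
    RestructReqPath line = pvFix line := by
  have hsub : "= require(".toList <:+: line.toList := by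
    rw [PySem.Str.isIn_iff_infix] at h; exact h
  have hpar : '(' ∈ line.toList := hsub.subset (by decide)
  obtain ⟨pre, mid, hcs, hp⟩ := pvSplitFirst hpar
  have hfind : PySem.Str.find line "(" = (pre.length : Int) := by
    rw [PySem.Str.find_eq, show "(".toList = ['('] from rfl, hcs]
    exact pvFind_decomp hp
  by_cases hm : '/' ∈ mid
  · -- a slash after the first '(' : both sides rewrite the line
    obtain ⟨u, tl, hmid, htl⟩ := pvSplitLast hm
    -- A side
    have hmidloop := pvLoop_high (st := (pre.length : Int)) hm ((pre.length : Int) + 1) (by omega)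
    have hparen : pvRestructLoop (pre.length : Int) (pre.length : Int) ('(' :: mid) =
        (true, '(' :: '"' :: '.' :: '/' :: pvAfterLast mid) := by
      simp [pvRestructLoop, hmidloop]
    obtain ⟨b, hb⟩ := pvLoop_low ((pre.length : Int)) pre 0 ('(' :: mid) (by simp)
    rw [zero_add] at hb
    have hA : (pvRestructLoop (pre.length : Int) 0 line.toList).2 =
        pre ++ '(' :: '"' :: '.' :: '/' :: pvAfterLast mid := by
      rw [hcs, hb, hparen]
    -- B side
    have hAL : pvAfterLast mid = tl := by rw [hmid]; exact pvAfterLast_last htl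
    have hcs' : line.toList = (pre ++ '(' :: u) ++ '/' :: tl := by
      rw [hcs, hmid]; simp
    have hALcs : pvAfterLast line.toList = tl := by rw [hcs']; exact pvAfterLast_last htl
    have hlen : line.toList.length = pre.length + u.length + tl.length + 2 := by
      rw [hcs']; simp; omega
    have hheadlen : line.toList.length - tl.length - 1 = (pre ++ '(' :: u).length := by
      simp [hlen]; omega
    have hhead : line.toList.take (line.toList.length - tl.length - 1) = pre ++ '(' :: u := by
      rw [hheadlen, hcs', List.take_left]
    have hpart : pvRPartition line.toList = (pre ++ '(' :: u, ['/'], tl) := by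
      unfold pvRPartition
      rw [show (line.toList.reverse.takeWhile (fun c => c != '/')).reverse = pvAfterLast line.toList from rfl,
          hALcs]
      rw [if_neg (by omega), hhead]
    have hfindhead : PySem.Chars.find (pre ++ '(' :: u) ['('] = (pre.length : Int) :=
      pvFind_decomp hp
    have hisin : PySem.Chars.isIn ['('] (pre ++ '(' :: u) = true := by
      rw [PySem.Chars.isIn_iff_infix]; exact ⟨pre, u, by simp⟩
    have htake : (pre ++ '(' :: u).take (pre.length + 1) = pre ++ ['('] := by
      rw [show pre ++ '(' :: u = (pre ++ ['(']) ++ u by simp,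
          List.take_left' (by simp)]
    unfold RestructReqPath pvFix
    rw [hfind, hA, hpart]
    rw [if_pos (by simp [hisin])]
    simp only [hfindhead, Int.toNat_natCast, htake, hAL]
    simp
  · -- no slash after the first '(' : both sides leave the line unchanged
    -- A side
    have hparen : pvRestructLoop (pre.length : Int) (pre.length : Int) ('(' :: mid) =
        (false, '(' :: mid) := by
      simp [pvRestructLoop, pvLoop_no_slash (pre.length : Int) hm ((pre.length : Int) + 1)]
    obtain ⟨b, hb⟩ := pvLoop_low ((pre.length : Int)) pre 0 ('(' :: mid) (by simp)
    rw [zero_add] at hb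
    have hA : RestructReqPath line = line := by
      unfold RestructReqPath
      rw [hfind, hcs, hb, hparen]
      simp only
      rw [← hcs, String.ofList_toList]
    rw [hA]
    by_cases hmp : '/' ∈ pre
    · -- last slash is before the '(' : head of rpartition contains no '('
      obtain ⟨u, tl0, hpre2, htl0⟩ := pvSplitLast hmp
      have htl' : '/' ∉ tl0 ++ '(' :: mid := by
        simp only [List.mem_append, List.mem_cons, not_or]
        exact ⟨htl0, by decide, hm⟩
      have hcs' : line.toList = u ++ '/' :: (tl0 ++ '(' :: mid) := by
        rw [hcs, hpre2]; simp
      have hALcs : pvAfterLast line.toList = tl0 ++ '(' :: mid := by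
        rw [hcs']; exact pvAfterLast_last htl'
      have hlen : line.toList.length = u.length + (tl0 ++ '(' :: mid).length + 1 := by
        rw [hcs']; simp; omega
      have hhead : line.toList.take (line.toList.length - (tl0 ++ '(' :: mid).length - 1) = u := by
        rw [show line.toList.length - (tl0 ++ '(' :: mid).length - 1 = u.length by omega,
            hcs', List.take_left]
      have hpart : pvRPartition line.toList = (u, ['/'], tl0 ++ '(' :: mid) := by
        unfold pvRPartition
        rw [show (line.toList.reverse.takeWhile (fun c => c != '/')).reverse = pvAfterLast line.toList from rfl,
            hALcs]
        rw [if_neg (by omega), hhead]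
      have hpu : '(' ∉ u := fun hin => hp (by rw [hpre2]; simp [hin])
      have hisin : PySem.Chars.isIn ['('] u = false := by
        rw [PySem.Chars.isIn_eq_false_iff, List.singleton_infix_iff]
        exact hpu
      unfold pvFix
      rw [hpart, if_neg (by simp [hisin])]
    · -- no slash at all
      have hns : '/' ∉ line.toList := by
        rw [hcs]
        simp only [List.mem_append, List.mem_cons, not_or]
        exact ⟨hmp, by decide, hm⟩
      have hpart : pvRPartition line.toList = ([], [], line.toList) := by
        unfold pvRPartition
        rw [show (line.toList.reverse.takeWhile (fun c => c != '/')).reverse = pvAfterLast line.toList from rfl,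
            pvAfterLast_no_slash hns]
        simp
      unfold pvFix
      rw [hpart, if_neg (by simp)]

theorem EditText_eq (text_file : List String) : EditText text_file = EditText_alt text_file := by
  unfold EditText EditText_alt
  rw [PySem.List.foldl_pyRange_zero_pyGetD text_file ""
      (fun edit_output line => edit_output ++
        [if PySem.Str.isIn "= require(" line then RestructReqPath line else line]) [],
      PySem.List.foldl_append_singleton_eq_map]
  simp only [List.nil_append]
  apply List.map_congr_left
  intro line _
  by_cases hr : PySem.Str.isIn "= require(" line = true
  · rw [pvFix_eq line hr]
  · rw [if_neg hr, if_neg hr]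

-- ===== VERDICT (by name: the statement is the Claim_ definition above) =====
theorem EditText_spec : Claim_equal_EditText := by
  intro text_file _
  unfold Spec_EditText
  exact EditText_eq text_file
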